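-- pv_equiv track=rewrite | github.com/Thejshri-A/Python-1000 | 317. Balanced Substring.py | balanced_substring
-- ===== SOURCE A (Python) =====
-- def balanced_substring(string):
--     balance=0
--     count=0
--     for s in string:
--         balance+=1 if s=="R" else -1
--         if balance==0:
--             count+=1
--     return count
-- ===== SOURCE B (Python) =====
-- def balanced_substring(string):
--     # Divide and conquer: zeros(s, base) returns (number of prefix positions of s
--     # where the running balance, started at base, hits zero; final balance).
--     def zeros(s, base):
--         if len(s) == 0:
--             return 0, base
--         if len(s) == 1:
--             b = base + (1 if s == "R" else -1)
--             return (1 if b == 0 else 0), b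
--         m = len(s) // 2
--         c1, b1 = zeros(s[:m], base)
--         c2, b2 = zeros(s[m:], b1)
--         return c1 + c2, b2
--     return zeros(string, 0)[0]
-- ===== Notes on version B (the rewrite author's own statement) =====
-- stated objective: alternative
-- what changed: Replaces A's single left-to-right scan with a divide-and-conquer recursion: split the string in half, recursively count zero-balance points in the left half and in the right half (seeded with the left half's final balance), and add the counts.
import Mathlib
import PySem

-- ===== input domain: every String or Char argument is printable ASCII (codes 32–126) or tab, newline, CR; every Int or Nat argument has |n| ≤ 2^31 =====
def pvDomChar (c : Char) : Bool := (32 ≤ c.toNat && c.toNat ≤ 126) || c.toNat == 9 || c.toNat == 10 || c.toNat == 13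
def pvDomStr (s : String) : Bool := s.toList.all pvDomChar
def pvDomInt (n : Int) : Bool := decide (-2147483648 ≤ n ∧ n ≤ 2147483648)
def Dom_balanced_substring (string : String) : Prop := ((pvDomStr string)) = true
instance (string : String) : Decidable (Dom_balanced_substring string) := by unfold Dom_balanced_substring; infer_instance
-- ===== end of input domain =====

-- B replaces A's single left-to-right scan with a divide-and-conquer recursion on string halves (objective: alternative).

-- ===== PORT A =====
def balanced_substring (string : String) : Int :=
  (string.toList.foldl
    (fun (p : Int × Int) s =>
      let balance := p.1 + (if s = 'R' then (1 : Int) else -1)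
      (balance, if balance = 0 then p.2 + 1 else p.2))
    (0, 0)).2

-- ===== PORT B =====
/-- B's helper `zeros(s, base)`: (count of zero-balance prefix points, final balance). -/
def pvZeros (l : List Char) (base : Int) : Int × Int :=
  if _h0 : l.length = 0 then (0, base)
  else if _h1 : l.length = 1 then
    let b := base + (if l = ['R'] then (1 : Int) else -1)
    ((if b = 0 then 1 else 0), b)
  else
    let m := l.length / 2
    let r1 := pvZeros (l.take m) base
    let r2 := pvZeros (l.drop m) r1.2
    (r1.1 + r2.1, r2.2)
termination_by l.length
decreasing_by
  · simp only [List.length_take]; omega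
  · simp only [List.length_drop]; omega

def balanced_substring_alt (string : String) : Int :=
  (pvZeros string.toList 0).1

-- ===== PRECONDITION & SPEC =====
def Spec_balanced_substring (string : String) (out : Int) : Prop := out = balanced_substring_alt string
instance (string : String) (out : Int) : Decidable (Spec_balanced_substring string out) := by unfold Spec_balanced_substring; infer_instance

-- ===== CLAIM (what is proved, stated in full; the proofs are below) =====
def Claim_equal_balanced_substring : Prop := ∀ (string : String), Dom_balanced_substring string → Spec_balanced_substring string (balanced_substring string)

-- ===== LEMMAS AND PROOFS =====

/-- The prefix-balance sequence of a list of chars starting from balance `b`. -/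
def pvPref (b : Int) : List Char → List Int
  | [] => []
  | c :: t => (b + (if c = 'R' then (1 : Int) else -1)) :: pvPref (b + (if c = 'R' then (1 : Int) else -1)) t

/-- Total balance contribution of a list of chars. -/
def pvSum (l : List Char) : Int :=
  (l.map (fun c => if c = 'R' then (1 : Int) else -1)).sum

theorem pvA_fold (l : List Char) : ∀ (b c : Int),
    (l.foldl
      (fun (p : Int × Int) s =>
        let balance := p.1 + (if s = 'R' then (1 : Int) else -1)
        (balance, if balance = 0 then p.2 + 1 else p.2))
      (b, c)).2 = c + ((pvPref b l).count 0 : Int) := by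
  induction l with
  | nil => intro b c; simp [pvPref]
  | cons h t ih =>
    intro b c
    simp only [List.foldl_cons, pvPref, List.count_cons]
    rw [ih]
    by_cases hz : b + (if h = 'R' then (1 : Int) else -1) = 0
    · simp [hz]; ring
    · simp [hz]

theorem pvPref_append (l1 l2 : List Char) : ∀ (b : Int),
    pvPref b (l1 ++ l2) = pvPref b l1 ++ pvPref (b + pvSum l1) l2 := by
  induction l1 with
  | nil => intro b; simp [pvPref, pvSum]
  | cons h t ih =>
    intro b
    simp only [List.cons_append, pvPref, ih, pvSum, List.map_cons, List.sum_cons]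
    have : b + (if h = 'R' then (1 : Int) else -1) + pvSum t
        = b + ((if h = 'R' then (1 : Int) else -1) + pvSum t) := by ring
    rw [pvSum] at this
    rw [this]

theorem pvZeros_eq (l : List Char) (base : Int) :
    pvZeros l base = (((pvPref base l).count 0 : Int), base + pvSum l) := by
  induction l, base using pvZeros.induct with
  | case1 l base h0 =>
    rw [pvZeros]
    simp_all [List.length_eq_zero_iff, pvPref, pvSum]
  | case2 l base h0 h1 =>
    rw [pvZeros]
    obtain ⟨c, hc⟩ := List.length_eq_one_iff.mp h1
    subst hc
    simp only [h1]
    have : ([c] = ['R']) ↔ (c = 'R') := by simp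
    by_cases hR : c = 'R' <;> simp [hR, pvPref, pvSum, List.count_cons]
  | case3 l base h0 h1 m r1 ih1 ih1' ih2 =>
    rw [pvZeros]
    simp only [dif_neg h0, dif_neg h1]
    have hr1 : r1 = pvZeros (List.take (l.length / 2) l) base := rfl
    rw [hr1, ih1] at ih2
    simp only at ih2
    rw [ih1, ih2]
    have hsplit := List.take_append_drop (l.length / 2) l
    have hpref := pvPref_append (l.take (l.length / 2)) (l.drop (l.length / 2)) base
    rw [hsplit] at hpref
    have hsum : pvSum l = pvSum (l.take (l.length / 2)) + pvSum (l.drop (l.length / 2)) := by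
      conv_lhs => rw [← hsplit]
      simp [pvSum]
    rw [hpref]
    have hm : m = l.length / 2 := rfl
    rw [hm]
    simp only [List.count_append, Prod.mk.injEq]
    refine ⟨by push_cast; ring, by rw [hsum]; ring⟩

-- ===== VERDICT (by name: the statement is the Claim_ definition above) =====
theorem balanced_substring_spec : Claim_equal_balanced_substring := by
  intro s _
  unfold Spec_balanced_substring balanced_substring balanced_substring_alt
  rw [pvA_fold, pvZeros_eq]
  simp
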